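-- pv_equiv track=rewrite | github.com/Taveeh/University | Year 1/Semester 1/Fundamentals of programming/Assignment 02/Assignment 2.py | second_property
-- ===== SOURCE A (Python) =====
-- def create_number(a = 0, b = 0):
--     return [a, b]
--
-- def get_real_part(number):
--     return number[0]
--
-- def get_imaginary_part(number):
--     return number[1]
--
-- def sum_complex(n1, n2):
--     return create_number(get_real_part(n1) + get_real_part(n2), get_imaginary_part(n1) + get_imaginary_part(n2))
--
-- def second_property(complexList):
--     s = [complexList[0], complexList[1]]
--     res = s
--     l = 2
--     lmax = 2
--     sumc = sum_complex(complexList[0], complexList[1])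
--     for i in range(1, len(complexList) - 1):
--         if sum_complex(complexList[i], complexList[i + 1]) == sumc:
--             l += 1
--             s.append(complexList[i + 1])
--             if l > lmax:
--                 res = s
--                 lmax = l
--         else:
--             l = 2
--             sumc = sum_complex(complexList[i], complexList[i + 1])
--             s = [complexList[i], complexList[i + 1]]
--     return res
-- ===== SOURCE B (Python) =====
-- def second_property(complexList):
--     n = len(complexList)
--     sums = [[complexList[i][0] + complexList[i + 1][0],
--              complexList[i][1] + complexList[i + 1][1]] for i in range(n - 1)]
--     best_start, best_len = 0, 2
--     start = 0
--     for i in range(1, len(sums)):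
--         if sums[i] == sums[i - 1]:
--             if i - start + 2 > best_len:
--                 best_start, best_len = start, i - start + 2
--         else:
--             start = i
--     return complexList[best_start:best_start + best_len]
-- ===== Notes on version B (the rewrite author's own statement) =====
-- stated objective: alternative
-- what changed: B precomputes the table of consecutive-pair sums once, finds the first longest run of equal adjacent table entries with an index-only scan (best_start/best_len), and returns one slice of the input, instead of A's incrementally grown and re-aliased run list compared against the stored first-pair sum.
import Mathlib
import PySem

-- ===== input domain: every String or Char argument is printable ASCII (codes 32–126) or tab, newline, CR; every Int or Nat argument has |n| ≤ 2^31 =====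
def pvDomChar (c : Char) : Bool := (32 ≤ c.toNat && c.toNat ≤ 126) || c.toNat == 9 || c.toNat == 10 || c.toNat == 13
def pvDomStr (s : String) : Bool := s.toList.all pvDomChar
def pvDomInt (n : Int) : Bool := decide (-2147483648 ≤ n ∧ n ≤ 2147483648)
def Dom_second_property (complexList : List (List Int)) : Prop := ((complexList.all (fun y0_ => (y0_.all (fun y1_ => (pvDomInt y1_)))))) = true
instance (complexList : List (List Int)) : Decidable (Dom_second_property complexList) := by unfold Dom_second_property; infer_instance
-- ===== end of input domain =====

-- B replaces A's incrementally grown run list and running first-pair-sum comparison by a precomputed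
-- pair-sum table, a longest-equal-run index scan, and one final slice; same asymptotic cost ("alternative").
-- Return-value equivalence only (A mutates only its own local lists; the argument is not mutated).


-- ===== PORT A =====
def create_number (a : Int) (b : Int) : List Int := [a, b]

def get_real_part (number : List Int) : Int := PySem.List.pyGetD number 0 0

def get_imaginary_part (number : List Int) : Int := PySem.List.pyGetD number 1 0

def sum_complex (n1 : List Int) (n2 : List Int) : List Int :=
  create_number (get_real_part n1 + get_real_part n2) (get_imaginary_part n1 + get_imaginary_part n2)

-- one iteration of A's for-loop (state: s, res, l, lmax, sumc); Python's 'res = s' aliasing is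
-- value-faithful here: every append to s while res aliases s is followed by 'res = s' again (l > lmax)
def stepA (L : List (List Int))
    (st : List (List Int) × List (List Int) × Int × Int × List Int) (i : Int) :
    List (List Int) × List (List Int) × Int × Int × List Int :=
  match st with
  | (s, res, l, lmax, sumc) =>
    if sum_complex (PySem.List.pyGetD L i []) (PySem.List.pyGetD L (i + 1) []) = sumc then
      let l := l + 1
      let s := s ++ [PySem.List.pyGetD L (i + 1) []]
      if l > lmax then (s, s, l, l, sumc) else (s, res, l, lmax, sumc)
    else
      ([PySem.List.pyGetD L i [], PySem.List.pyGetD L (i + 1) []], res, 2, lmax,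
        sum_complex (PySem.List.pyGetD L i []) (PySem.List.pyGetD L (i + 1) []))

def second_property (complexList : List (List Int)) : List (List Int) :=
  let s := [PySem.List.pyGetD complexList 0 [], PySem.List.pyGetD complexList 1 []]
  let res := s
  let sumc := sum_complex (PySem.List.pyGetD complexList 0 []) (PySem.List.pyGetD complexList 1 [])
  let st := (PySem.List.pyRange 1 ((complexList.length : Int) - 1) 1).foldl (stepA complexList)
    (s, res, 2, 2, sumc)
  st.2.1

-- ===== PORT B =====
-- the entry of B's pair-sum table comprehension
def pairSum (L : List (List Int)) (i : Int) : List Int :=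
  [PySem.List.pyGetD (PySem.List.pyGetD L i []) 0 0 + PySem.List.pyGetD (PySem.List.pyGetD L (i + 1) []) 0 0,
   PySem.List.pyGetD (PySem.List.pyGetD L i []) 1 0 + PySem.List.pyGetD (PySem.List.pyGetD L (i + 1) []) 1 0]

def sumsOf (L : List (List Int)) : List (List Int) :=
  (PySem.List.pyRange 0 ((L.length : Int) - 1) 1).map (pairSum L)

-- one iteration of B's for-loop (state: best_start, best_len, start)
def stepB (sums : List (List Int)) (st : Int × Int × Int) (i : Int) : Int × Int × Int :=
  match st with
  | (best_start, best_len, start) =>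
    if PySem.List.pyGetD sums i [] = PySem.List.pyGetD sums (i - 1) [] then
      if i - start + 2 > best_len then (start, i - start + 2, start)
      else (best_start, best_len, start)
    else (best_start, best_len, i)

def second_property_alt (complexList : List (List Int)) : List (List Int) :=
  let sums := sumsOf complexList
  let st := (PySem.List.pyRange 1 ((sums.length : Int)) 1).foldl (stepB sums) (0, 2, 0)
  PySem.List.slice complexList (some st.1) (some (st.1 + st.2.1))

-- ===== PRECONDITION & SPEC =====
-- Pre_ excludes exactly the inputs on which the Python A raises IndexError: fewer than two
-- elements, or an element with fewer than two components.
def Pre_second_property (complexList : List (List Int)) : Prop :=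
  2 ≤ complexList.length ∧ ∀ x ∈ complexList, 2 ≤ x.length
instance (complexList : List (List Int)) : Decidable (Pre_second_property complexList) := by
  unfold Pre_second_property; infer_instance

def pvWitness_second_property : List (List Int) := [[1, 2], [3, 4], [2, 5]]


def Spec_second_property (complexList : List (List Int)) (out : List (List Int)) : Prop :=
  out = second_property_alt complexList
instance (complexList : List (List Int)) (out : List (List Int)) :
    Decidable (Spec_second_property complexList out) := by unfold Spec_second_property; infer_instance

-- ===== CLAIM (what is proved, stated in full; the proofs are below) =====
def Claim_equal_second_property : Prop := ∀ (complexList : List (List Int)),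
  Dom_second_property complexList → Pre_second_property complexList →
  Spec_second_property complexList (second_property complexList)


-- ===== LEMMAS AND PROOFS =====

-- the contiguous segment L[a:b] of the input, as drop/take — the shared shape of A's s/res and B's slice
def seg (L : List (List Int)) (a b : Nat) : List (List Int) := (L.drop a).take (b - a)

lemma sums_get (L : List (List Int)) (i : Int) (h0 : 0 ≤ i) (h1 : i < (L.length : Int) - 1) :
    PySem.List.pyGetD (sumsOf L) i [] = pairSum L i := by
  unfold sumsOf
  exact PySem.List.pyGetD_map_pyRange_of_nonneg _ _ _ _ h0 h1

lemma sums_len (L : List (List Int)) : (sumsOf L).length = L.length - 1 := by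
  unfold sumsOf
  rw [List.length_map, PySem.List.length_pyRange_one]
  omega

lemma seg_snoc (L : List (List Int)) (c t : Nat) (hc : c ≤ t) (ht : t < L.length) :
    seg L c t ++ [PySem.List.pyGetD L (t : Int) []] = seg L c (t + 1) := by
  unfold seg
  rw [PySem.List.pyGetD_natCast, List.getD_eq_getElem L [] ht]
  rw [show t + 1 - c = (t - c) + 1 by omega, List.take_add_one]
  congr 1
  rw [List.getElem?_drop, show c + (t - c) = t by omega]
  simp [ht]

lemma seg_two (L : List (List Int)) (j : Nat) (hj : j + 1 < L.length) :
    [PySem.List.pyGetD L (j : Int) [], PySem.List.pyGetD L ((j : Int) + 1) []] = seg L j (j + 2) := by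
  have h1 : seg L j j = [] := by unfold seg; simp
  have h2 := seg_snoc L j j (le_refl j) (by omega)
  have h3 := seg_snoc L j (j + 1) (by omega) hj
  rw [show ((j : Int) + 1) = ((j + 1 : Nat) : Int) by push_cast; ring]
  rw [← h3, ← h2, h1]
  simp

-- the joint loop invariant: A's state is (seg c (j+1), seg b (b+lm), j+1-c, lm, pairSum (j-1))
-- exactly when B's state is (b, lm, c); both loops then keep this relation step by step
lemma fold_corr (L : List (List Int)) :
    ∀ (k j c b lm : Nat), j + k + 1 = L.length → 1 ≤ j → c < j → 2 ≤ lm →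
    ((PySem.List.pyRange (j : Int) ((L.length : Int) - 1) 1).foldl (stepA L)
        (seg L c (j + 1), seg L b (b + lm), ((j + 1 - c : Nat) : Int), (lm : Int),
          pairSum L ((j : Int) - 1))).2.1
      =
    PySem.List.slice L
      (some (((PySem.List.pyRange (j : Int) ((L.length : Int) - 1) 1).foldl (stepB (sumsOf L))
        ((b : Int), (lm : Int), (c : Int))).1))
      (some (((PySem.List.pyRange (j : Int) ((L.length : Int) - 1) 1).foldl (stepB (sumsOf L))
        ((b : Int), (lm : Int), (c : Int))).1 +
        ((PySem.List.pyRange (j : Int) ((L.length : Int) - 1) 1).foldl (stepB (sumsOf L))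
        ((b : Int), (lm : Int), (c : Int))).2.1)) := by
  intro k
  induction k with
  | zero =>
    intro j c b lm hn hj hc hlm
    rw [PySem.List.pyRange_one_eq_nil (by omega)]
    simp only [List.foldl_nil]
    rw [show ((b : Int) + (lm : Int)) = ((b + lm : Nat) : Int) by push_cast; ring,
      PySem.List.slice_natCast]
    rfl
  | succ k ih =>
    intro j c b lm hn hj hc hlm
    have hjn : (j : Int) < (L.length : Int) - 1 := by omega
    rw [PySem.List.pyRange_one_cons hjn, List.foldl_cons, List.foldl_cons]
    have hga : sum_complex (PySem.List.pyGetD L (j : Int) []) (PySem.List.pyGetD L ((j : Int) + 1) [])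
        = pairSum L (j : Int) := rfl
    have hsj : PySem.List.pyGetD (sumsOf L) (j : Int) [] = pairSum L (j : Int) :=
      sums_get L _ (by omega) (by omega)
    have hsj' : PySem.List.pyGetD (sumsOf L) ((j : Int) - 1) [] = pairSum L ((j : Int) - 1) :=
      sums_get L _ (by omega) (by omega)
    simp only [stepA, stepB, hga, hsj, hsj']
    by_cases hm : pairSum L (j : Int) = pairSum L ((j : Int) - 1)
    · rw [if_pos hm, if_pos hm]
      have hsn : seg L c (j + 1) ++ [PySem.List.pyGetD L ((j : Int) + 1) []] = seg L c (j + 2) := by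
        have h := seg_snoc L c (j + 1) (by omega) (by omega)
        rw [show ((j : Int) + 1) = ((j + 1 : Nat) : Int) by push_cast; ring]
        rw [h]
      by_cases hup : ((j : Int) - (c : Int) + 2 > (lm : Int))
      · rw [if_pos (by omega : ((j + 1 - c : Nat) : Int) + 1 > (lm : Int)), if_pos hup]
        rw [hsn]
        have goal := ih (j + 1) c c (j + 2 - c) (by omega) (by omega) (by omega) (by omega)
        simp only [show j + 1 + 1 = j + 2 from by omega] at goal
        rw [show c + (j + 2 - c) = j + 2 from by omega] at goal
        rw [show (((j + 1 : Nat) : Int) - 1) = (j : Int) from by omega, hm] at goal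
        rw [show (((j + 1 : Nat) : Int)) = (j : Int) + 1 from by push_cast; ring] at goal
        rw [show ((j + 1 - c : Nat) : Int) + 1 = ((j + 2 - c : Nat) : Int) from by omega,
          show ((j : Int) - (c : Int) + 2) = ((j + 2 - c : Nat) : Int) from by omega]
        exact goal
      · rw [if_neg (show ¬ (((j + 1 - c : Nat) : Int) + 1 > (lm : Int)) from by omega), if_neg hup]
        rw [hsn]
        have goal := ih (j + 1) c b lm (by omega) (by omega) (by omega) (by omega)
        simp only [show j + 1 + 1 = j + 2 from by omega] at goal
        rw [show (((j + 1 : Nat) : Int) - 1) = (j : Int) from by omega, hm] at goal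
        rw [show (((j + 1 : Nat) : Int)) = (j : Int) + 1 from by push_cast; ring] at goal
        rw [show ((j + 1 - c : Nat) : Int) + 1 = ((j + 2 - c : Nat) : Int) from by omega]
        exact goal
    · rw [if_neg hm, if_neg hm]
      rw [seg_two L j (by omega)]
      have goal := ih (j + 1) j b lm (by omega) (by omega) (by omega) (by omega)
      simp only [show j + 1 + 1 = j + 2 from by omega] at goal
      rw [show ((j + 2 - j : Nat) : Int) = (2 : Int) from by omega] at goal
      rw [show (((j + 1 : Nat) : Int) - 1) = (j : Int) from by omega] at goal
      rw [show (((j + 1 : Nat) : Int)) = (j : Int) + 1 from by push_cast; ring] at goal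
      exact goal

-- ===== VERDICT (by name: the statement is the Claim_ definition above) =====
theorem second_property_spec : Claim_equal_second_property := by
  intro L _ hPre
  obtain ⟨hn, -⟩ := hPre
  unfold Spec_second_property second_property second_property_alt
  dsimp only
  have hlen : (((sumsOf L).length : Nat) : Int) = (L.length : Int) - 1 := by
    rw [sums_len]; omega
  rw [hlen]
  have goal := fold_corr L (L.length - 2) 1 0 0 2 (by omega) (by omega) (by omega) (by omega)
  norm_num at goal
  have hs0 : [PySem.List.pyGetD L 0 [], PySem.List.pyGetD L 1 []] = seg L 0 2 := by
    have h := seg_two L 0 (by omega)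
    norm_num at h
    exact h
  have hc0 : sum_complex (PySem.List.pyGetD L 0 []) (PySem.List.pyGetD L 1 []) = pairSum L 0 := rfl
  rw [hs0, hc0]
  exact goal
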